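-- pv_equiv track=rewrite | github.com/kwesiJones/ModelDetector | signature_collector.py | _extract_model_from_source
-- ===== SOURCE A (Python) =====
-- def _extract_model_from_source(source: str) -> str:
--     if not source:
--         return 'unknown'
--     source = source.lower()
--
--     # Handle specific DAIGT source patterns
--     if any(x in source for x in ['chat_gpt', 'chatgpt', 'gpt_moth']):
--         return 'gpt-3.5-turbo'
--     elif any(x in source for x in ['gpt-4', 'gpt4']):
--         return 'gpt-4'
--     elif any(x in source for x in ['mistral7b', 'mistral_7b', 'mistral-7b']):
--         return 'mistral-7b'
--     elif any(x in source for x in ['llama2', 'llama_2', 'llama-2']):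
--         return 'llama-2'
--     elif any(x in source for x in ['llama_70b', 'llama-70b', 'llama70b']):
--         return 'llama-70b'
--     elif 'llama' in source:
--         return 'llama'
--     elif any(x in source for x in ['falcon_180b', 'falcon-180b', 'falcon180b']):
--         return 'falcon-180b'
--     elif 'falcon' in source:
--         return 'falcon'
--     elif any(x in source for x in ['claude', 'darragh_claude']):
--         return 'claude-2'
--     elif any(x in source for x in ['palm', 'bard', 'kingki19_palm']):
--         return 'palm'
--     elif any(x in source for x in ['gemini', 'bison']):
--         return 'gemini'
--     elif any(x in source for x in ['davinci', 'text-davinci']):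
--         return 'text-davinci-003'
--     elif 'neural-chat' in source:
--         return 'neural-chat-7b'
--     elif any(x in source for x in ['bloom', 'bigscience']):
--         return 'bloom'
--     elif any(x in source for x in ['t5', 'flan']):
--         return 't5'
--     elif 'persuade_corpus' in source:
--         return 'human'  # This indicates human-written content
--
--     return 'unknown'
-- ===== SOURCE B (Python) =====
-- # Text-driven matcher: scan the source position by position; a first-character
-- # index maps each char to its candidate (priority, pattern) pairs; keep the best
-- # (lowest) priority whose pattern starts there and resolve the label at the end.
-- _GROUPS = [
--     (['chat_gpt', 'chatgpt', 'gpt_moth'], 'gpt-3.5-turbo'),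
--     (['gpt-4', 'gpt4'], 'gpt-4'),
--     (['mistral7b', 'mistral_7b', 'mistral-7b'], 'mistral-7b'),
--     (['llama2', 'llama_2', 'llama-2'], 'llama-2'),
--     (['llama_70b', 'llama-70b', 'llama70b'], 'llama-70b'),
--     (['llama'], 'llama'),
--     (['falcon_180b', 'falcon-180b', 'falcon180b'], 'falcon-180b'),
--     (['falcon'], 'falcon'),
--     (['claude', 'darragh_claude'], 'claude-2'),
--     (['palm', 'bard', 'kingki19_palm'], 'palm'),
--     (['gemini', 'bison'], 'gemini'),
--     (['davinci', 'text-davinci'], 'text-davinci-003'),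
--     (['neural-chat'], 'neural-chat-7b'),
--     (['bloom', 'bigscience'], 'bloom'),
--     (['t5', 'flan'], 't5'),
--     (['persuade_corpus'], 'human'),
-- ]
--
-- _CANDS = {}
-- for _j, (_patterns, _label) in enumerate(_GROUPS):
--     for _p in _patterns:
--         _CANDS.setdefault(_p[0], []).append((_j, _p))
--
--
-- def _extract_model_from_source(source: str) -> str:
--     if not source:
--         return 'unknown'
--     s = source.lower()
--     best = len(_GROUPS)  # sentinel: nothing matched yet
--     for i in range(len(s)):
--         for j, p in _CANDS.get(s[i], ()):
--             if j < best and s.startswith(p, i):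
--                 best = j
--     return _GROUPS[best][1] if best < len(_GROUPS) else 'unknown'
-- ===== Notes on version B (the rewrite author's own statement) =====
-- stated objective: alternative
-- what changed: A is a pattern-major first-match ladder (16 ordered branches, each a substring scan of the whole source); B is a text-driven multi-pattern matcher: a dict indexes the patterns by first character, the source is scanned once position by position looking up the candidates for the current character, the minimum matching priority is accumulated, and the label is resolved from that minimum at the end.
import Mathlib
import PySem

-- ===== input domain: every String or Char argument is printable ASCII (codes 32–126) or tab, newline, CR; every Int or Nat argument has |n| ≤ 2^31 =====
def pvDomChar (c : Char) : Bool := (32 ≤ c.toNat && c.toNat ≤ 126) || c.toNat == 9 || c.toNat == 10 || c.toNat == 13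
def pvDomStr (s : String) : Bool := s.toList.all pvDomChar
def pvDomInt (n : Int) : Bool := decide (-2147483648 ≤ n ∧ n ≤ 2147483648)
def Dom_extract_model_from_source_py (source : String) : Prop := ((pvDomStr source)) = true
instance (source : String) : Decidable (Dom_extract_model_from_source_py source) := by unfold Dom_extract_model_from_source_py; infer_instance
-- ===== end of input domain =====

-- B replaces A's pattern-major first-match ladder by a text-driven multi-pattern
-- matcher: a first-character index of the patterns, one scan over the source
-- keeping the minimum matching priority, and a final label resolution (alternative).

-- ===== PORT A =====
def extract_model_from_source_py (source : String) : String :=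
  if source = "" then "unknown" else
  let s := PySem.Str.lower source
  if ["chat_gpt", "chatgpt", "gpt_moth"].any (fun x => PySem.Str.isIn x s) then "gpt-3.5-turbo"
  else if ["gpt-4", "gpt4"].any (fun x => PySem.Str.isIn x s) then "gpt-4"
  else if ["mistral7b", "mistral_7b", "mistral-7b"].any (fun x => PySem.Str.isIn x s) then "mistral-7b"
  else if ["llama2", "llama_2", "llama-2"].any (fun x => PySem.Str.isIn x s) then "llama-2"
  else if ["llama_70b", "llama-70b", "llama70b"].any (fun x => PySem.Str.isIn x s) then "llama-70b"
  else if PySem.Str.isIn "llama" s then "llama"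
  else if ["falcon_180b", "falcon-180b", "falcon180b"].any (fun x => PySem.Str.isIn x s) then "falcon-180b"
  else if PySem.Str.isIn "falcon" s then "falcon"
  else if ["claude", "darragh_claude"].any (fun x => PySem.Str.isIn x s) then "claude-2"
  else if ["palm", "bard", "kingki19_palm"].any (fun x => PySem.Str.isIn x s) then "palm"
  else if ["gemini", "bison"].any (fun x => PySem.Str.isIn x s) then "gemini"
  else if ["davinci", "text-davinci"].any (fun x => PySem.Str.isIn x s) then "text-davinci-003"
  else if PySem.Str.isIn "neural-chat" s then "neural-chat-7b"
  else if ["bloom", "bigscience"].any (fun x => PySem.Str.isIn x s) then "bloom"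
  else if ["t5", "flan"].any (fun x => PySem.Str.isIn x s) then "t5"
  else if PySem.Str.isIn "persuade_corpus" s then "human"
  else "unknown"

-- ===== PORT B =====
def pvGroups : List (List String × String) :=
  [(["chat_gpt", "chatgpt", "gpt_moth"], "gpt-3.5-turbo"),
   (["gpt-4", "gpt4"], "gpt-4"),
   (["mistral7b", "mistral_7b", "mistral-7b"], "mistral-7b"),
   (["llama2", "llama_2", "llama-2"], "llama-2"),
   (["llama_70b", "llama-70b", "llama70b"], "llama-70b"),
   (["llama"], "llama"),
   (["falcon_180b", "falcon-180b", "falcon180b"], "falcon-180b"),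
   (["falcon"], "falcon"),
   (["claude", "darragh_claude"], "claude-2"),
   (["palm", "bard", "kingki19_palm"], "palm"),
   (["gemini", "bison"], "gemini"),
   (["davinci", "text-davinci"], "text-davinci-003"),
   (["neural-chat"], "neural-chat-7b"),
   (["bloom", "bigscience"], "bloom"),
   (["t5", "flan"], "t5"),
   (["persuade_corpus"], "human")]

-- Source B's index build: 'for j, (patterns, _) in enumerate(_GROUPS): for p in patterns:
-- _CANDS.setdefault(p[0], []).append((j, p))' — setdefault+append is Dict.modify with
-- default []; p[0] (a nonempty literal) is ported exactly as p.toList.headD ' '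
def pvBuildCands : Nat -> PySem.Dict Char (List (Nat × String)) -> List (List String × String) -> PySem.Dict Char (List (Nat × String))
  | _, d, [] => d
  | j, d, g :: rest =>
      pvBuildCands (j + 1)
        (g.1.foldl (fun d p => d.modify (p.toList.headD ' ') [] (· ++ [(j, p)])) d) rest

def pvCands : PySem.Dict Char (List (Nat × String)) := pvBuildCands 0 PySem.Dict.empty pvGroups

-- Source B's inner loop: 'for j, p in _CANDS.get(s[i], ()): if j < best and s.startswith(p, i): best = j'
-- (s.startswith(p, i) is ported exactly, for 0 ≤ i ≤ len(s), as 'p is a prefix of s with i chars dropped')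
def pvInnerB (s : List Char) (i : Nat) (b : Nat) : Nat :=
  (pvCands.getD (s.getD i ' ') []).foldl
    (fun b q => if q.1 < b && PySem.Chars.startswith (List.drop i s) q.2.toList then q.1 else b) b

def extract_model_from_source_py_alt (source : String) : String :=
  if source = "" then "unknown" else
  let s := PySem.Chars.lower source.toList
  let best := (List.range s.length).foldl (fun b i => pvInnerB s i b) pvGroups.length
  if best < pvGroups.length then (PySem.List.pyGetD pvGroups (best : Int) ([], "unknown")).2
  else "unknown"

-- ===== PRECONDITION & SPEC =====
def Spec_extract_model_from_source_py (source : String) (out : String) : Prop := out = extract_model_from_source_py_alt source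
instance (source : String) (out : String) : Decidable (Spec_extract_model_from_source_py source out) := by unfold Spec_extract_model_from_source_py; infer_instance

-- ===== CLAIM (what is proved, stated in full; the proofs are below) =====
def Claim_equal_extract_model_from_source_py : Prop := ∀ (source : String), Dom_extract_model_from_source_py source → Spec_extract_model_from_source_py source (extract_model_from_source_py source)

-- ===== LEMMAS AND PROOFS =====

-- does some pattern of group g start at position i of s?
def pvMatchAt (s : List Char) (i : Nat) (g : List String × String) : Bool :=
  g.1.any (fun p => PySem.Chars.startswith (List.drop i s) p.toList)

-- does some pattern of group g occur anywhere in s?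
def pvMatchIn (s : List Char) (g : List String × String) : Bool :=
  g.1.any (fun p => PySem.Chars.isIn p.toList s)

-- first index ≥ k (counting from k) of a group satisfying p
def pvMu (p : List String × String -> Bool) : Nat -> List (List String × String) -> Option Nat
  | _, [] => none
  | k, g :: rest => if p g then some k else pvMu p (k + 1) rest

-- A's ladder, abstractly
def pvLadder (s : List Char) : List (List String × String) -> String
  | [] => "unknown"
  | g :: rest => if pvMatchIn s g then g.2 else pvLadder s rest

-- the index build, flattened: (first char, (priority, pattern)) for all 34 patterns
def pvFlat : List (Char × (Nat × String)) :=
  [('c', (0, "chat_gpt")),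
   ('c', (0, "chatgpt")),
   ('g', (0, "gpt_moth")),
   ('g', (1, "gpt-4")),
   ('g', (1, "gpt4")),
   ('m', (2, "mistral7b")),
   ('m', (2, "mistral_7b")),
   ('m', (2, "mistral-7b")),
   ('l', (3, "llama2")),
   ('l', (3, "llama_2")),
   ('l', (3, "llama-2")),
   ('l', (4, "llama_70b")),
   ('l', (4, "llama-70b")),
   ('l', (4, "llama70b")),
   ('l', (5, "llama")),
   ('f', (6, "falcon_180b")),
   ('f', (6, "falcon-180b")),
   ('f', (6, "falcon180b")),
   ('f', (7, "falcon")),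
   ('c', (8, "claude")),
   ('d', (8, "darragh_claude")),
   ('p', (9, "palm")),
   ('b', (9, "bard")),
   ('k', (9, "kingki19_palm")),
   ('g', (10, "gemini")),
   ('b', (10, "bison")),
   ('d', (11, "davinci")),
   ('t', (11, "text-davinci")),
   ('n', (12, "neural-chat")),
   ('b', (13, "bloom")),
   ('b', (13, "bigscience")),
   ('t', (14, "t5")),
   ('f', (14, "flan")),
   ('p', (15, "persuade_corpus"))]

theorem pvMu_none_iff {p : List String × String -> Bool} {gs : List (List String × String)} :
    ∀ {k : Nat}, pvMu p k gs = none ↔ ∀ g ∈ gs, p g = false := by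
  induction gs with
  | nil => intro k; simp [pvMu]
  | cons g rest ih =>
    intro k
    simp only [pvMu, List.mem_cons]
    constructor
    · intro h; split at h
      · cases h
      · intro g' hg'; rcases hg' with rfl | hg'
        · next hpg => exact Bool.eq_false_iff.2 hpg
        · exact ih.1 h g' hg'
    · intro h; rw [if_neg (by simp [h g (Or.inl rfl)]), ih]
      intro g' hg'; exact h g' (Or.inr hg')

theorem pvMu_shift {p : List String × String -> Bool} {gs : List (List String × String)} :
    ∀ {k : Nat}, pvMu p (k + 1) gs = (pvMu p k gs).map (· + 1) := by
  induction gs with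
  | nil => intro k; simp [pvMu]
  | cons g rest ih =>
    intro k
    simp only [pvMu]
    split
    · simp
    · exact ih

-- pvMu at 0: the value is a matching index
theorem pvMu_zero_mem {p : List String × String -> Bool} {gs : List (List String × String)} :
    ∀ {x : Nat}, pvMu p 0 gs = some x → ∃ h : x < gs.length, p gs[x] = true := by
  induction gs with
  | nil => intro x h; simp [pvMu] at h
  | cons g rest ih =>
    intro x h
    simp only [pvMu] at h
    split at h
    · cases h; next hp => exact ⟨by simp, hp⟩
    · rw [pvMu_shift] at h
      cases hx : pvMu p 0 rest with
      | none => rw [hx] at h; cases h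
      | some y =>
        rw [hx] at h
        simp only [Option.map_some, Option.some.injEq] at h
        subst h
        obtain ⟨hy, hpy⟩ := ih hx
        exact ⟨by simpa using Nat.succ_lt_succ hy, by simpa using hpy⟩

-- pvMu at 0: the value is minimal among matching indices
theorem pvMu_zero_min {p : List String × String -> Bool} {gs : List (List String × String)} :
    ∀ {x : Nat}, pvMu p 0 gs = some x → ∀ y, (hy : y < gs.length) → p gs[y] = true → x ≤ y := by
  induction gs with
  | nil => intro x h; simp [pvMu] at h
  | cons g rest ih =>
    intro x h y hy hpy
    simp only [pvMu] at h
    split at h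
    · cases h; omega
    · rw [pvMu_shift] at h
      cases hx : pvMu p 0 rest with
      | none => rw [hx] at h; cases h
      | some z =>
        rw [hx] at h
        simp only [Option.map_some, Option.some.injEq] at h
        subst h
        cases y with
        | zero => simp at hpy; next hpg => exact absurd hpy hpg
        | succ y' =>
          have := ih hx y' (by simpa using Nat.lt_of_succ_lt_succ hy) (by simpa using hpy)
          omega

-- per-pattern bridge: 'p in s' ⟺ p starts at some position i < len(s)  (p nonempty)
theorem pvPattBridge (s : List Char) (p : String) (hp : p.toList ≠ []) :
    PySem.Chars.isIn p.toList s = true ↔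
      ∃ i, i < s.length ∧ PySem.Chars.startswith (List.drop i s) p.toList = true := by
  rw [← PySem.Chars.exists_prefix_drop_iff_isIn]
  constructor
  · rintro ⟨j, hj⟩
    by_cases hjn : j < s.length
    · exact ⟨j, hjn, (PySem.Chars.startswith_iff _ _).2 hj⟩
    · exfalso
      rw [List.drop_eq_nil_of_le (by omega)] at hj
      exact hp (List.prefix_nil.1 hj)
  · rintro ⟨i, _, hi⟩
    exact ⟨i, (PySem.Chars.startswith_iff _ _).1 hi⟩

-- group bridge: a group occurs in s iff it matches at some position
theorem pvGroupBridge (s : List Char) (g : List String × String)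
    (hg : ∀ p ∈ g.1, p.toList ≠ []) :
    pvMatchIn s g = true ↔ ∃ i, i < s.length ∧ pvMatchAt s i g = true := by
  simp only [pvMatchIn, pvMatchAt, List.any_eq_true]
  constructor
  · rintro ⟨p, hp, hin⟩
    obtain ⟨i, hi, hst⟩ := (pvPattBridge s p (hg p hp)).1 hin
    exact ⟨i, hi, p, hp, hst⟩
  · rintro ⟨i, hi, p, hp, hst⟩
    exact ⟨p, hp, (pvPattBridge s p (hg p hp)).2 ⟨i, hi, hst⟩⟩

theorem pvGroups_nonempty : ∀ g ∈ pvGroups, ∀ p ∈ g.1, p.toList ≠ [] := by decide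

-- the index build is the flat fold over pvFlat (both closed terms)
set_option maxRecDepth 8192 in
theorem pvCands_eq_flat :
    pvCands = pvFlat.foldl (fun d q => d.modify q.1 [] (· ++ [q.2])) PySem.Dict.empty := by
  rfl

-- candidate lists, characterised
theorem pvCands_getD (c : Char) :
    pvCands.getD c [] = (pvFlat.filter (fun q => q.1 == c)).map (·.2) := by
  rw [pvCands_eq_flat, PySem.Dict.getD_foldl_modify_append, PySem.Dict.getD_empty]
  simp

-- every flat entry is a real (priority, pattern) of pvGroups, filed under its first char
theorem pvFlat_sound : ∀ q ∈ pvFlat,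
    q.2.1 < pvGroups.length ∧ q.2.2 ∈ (pvGroups.getD q.2.1 ([], "unknown")).1 := by decide

-- every (priority, pattern) of pvGroups appears in pvFlat under its first char
theorem pvFlat_complete : ∀ j, j < pvGroups.length →
    ∀ p ∈ (pvGroups.getD j ([], "unknown")).1, (p.toList.headD ' ', (j, p)) ∈ pvFlat := by decide

-- a pattern starting at i fixes the character at i
theorem pvHeadAt (s : List Char) (i : Nat) (p : String) (hp : p.toList ≠ [])
    (hst : PySem.Chars.startswith (List.drop i s) p.toList = true) :
    s.getD i ' ' = p.toList.headD ' ' := by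
  have hpre := (PySem.Chars.startswith_iff _ _).1 hst
  cases hp' : p.toList with
  | nil => exact absurd hp' hp
  | cons a t =>
    rw [hp'] at hpre
    obtain ⟨u, hu⟩ := hpre
    have h1 : s[i]? = some a := by rw [← List.head?_drop, ← hu]; rfl
    rw [List.getD_eq_getElem?_getD, h1]
    simp

-- inner fold: never increases the accumulator
theorem pvInner_le (s : List Char) (i : Nat) :
    ∀ (L : List (Nat × String)) (b : Nat),
      L.foldl (fun b q => if q.1 < b && PySem.Chars.startswith (List.drop i s) q.2.toList then q.1 else b) b ≤ b := by
  intro L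
  induction L with
  | nil => intro b; simp
  | cons q rest ih =>
    intro b
    simp only [List.foldl_cons]
    refine le_trans (ih _) ?_
    by_cases hc : (decide (q.1 < b) && PySem.Chars.startswith (List.drop i s) q.2.toList) = true
    · rw [if_pos hc]; simp at hc; omega
    · rw [if_neg hc]

-- inner fold: bounded by any matching candidate in the list
theorem pvInner_le_of_mem (s : List Char) (i : Nat) :
    ∀ (L : List (Nat × String)) (b : Nat) (q : Nat × String), q ∈ L →
      PySem.Chars.startswith (List.drop i s) q.2.toList = true →
      L.foldl (fun b q => if q.1 < b && PySem.Chars.startswith (List.drop i s) q.2.toList then q.1 else b) b ≤ q.1 := by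
  intro L
  induction L with
  | nil => intro b q hq; simp at hq
  | cons q0 rest ih =>
    intro b q hq hst
    simp only [List.foldl_cons]
    rcases List.mem_cons.1 hq with rfl | hq
    · refine le_trans (pvInner_le s i rest _) ?_
      by_cases hb : q.1 < b
      · rw [if_pos (by simp [hb, hst])]
      · rw [if_neg (by simp [hst, hb])]; omega
    · exact ih _ q hq hst

-- inner fold: the result is the accumulator or a matching candidate's priority
theorem pvInner_cases (s : List Char) (i : Nat) :
    ∀ (L : List (Nat × String)) (b : Nat),
      L.foldl (fun b q => if q.1 < b && PySem.Chars.startswith (List.drop i s) q.2.toList then q.1 else b) b = b ∨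
      ∃ q ∈ L, PySem.Chars.startswith (List.drop i s) q.2.toList = true ∧
        L.foldl (fun b q => if q.1 < b && PySem.Chars.startswith (List.drop i s) q.2.toList then q.1 else b) b = q.1 := by
  intro L
  induction L with
  | nil => intro b; left; rfl
  | cons q0 rest ih =>
    intro b
    simp only [List.foldl_cons]
    rcases ih (if q0.1 < b && PySem.Chars.startswith (List.drop i s) q0.2.toList then q0.1 else b) with h | ⟨q, hq, hst, hval⟩
    · rw [h]
      by_cases hc : (decide (q0.1 < b) && PySem.Chars.startswith (List.drop i s) q0.2.toList) = true
      · right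
        refine ⟨q0, List.mem_cons_self, ?_, ?_⟩
        · simp at hc; exact hc.2
        · rw [if_pos hc]
      · left; rw [if_neg hc]
    · right; exact ⟨q, List.mem_cons_of_mem _ hq, hst, hval⟩

-- outer fold: never increases the accumulator
theorem pvOuter_le (s : List Char) :
    ∀ (l : List Nat) (b : Nat), l.foldl (fun b i => pvInnerB s i b) b ≤ b := by
  intro l
  induction l with
  | nil => intro b; simp
  | cons i rest ih =>
    intro b
    simp only [List.foldl_cons]
    exact le_trans (ih _) (pvInner_le s i _ b)

-- outer fold: bounded by any candidate matching at a visited position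
theorem pvOuter_le_of_mem (s : List Char) :
    ∀ (l : List Nat) (b i : Nat), i ∈ l →
      ∀ q ∈ pvCands.getD (s.getD i ' ') [],
        PySem.Chars.startswith (List.drop i s) q.2.toList = true →
        l.foldl (fun b i => pvInnerB s i b) b ≤ q.1 := by
  intro l
  induction l with
  | nil => intro b i hi; simp at hi
  | cons i0 rest ih =>
    intro b i hi q hq hst
    simp only [List.foldl_cons]
    rcases List.mem_cons.1 hi with rfl | hi
    · exact le_trans (pvOuter_le s rest _) (pvInner_le_of_mem s i _ b q hq hst)
    · exact ih _ i hi q hq hst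

-- outer fold: the result is the initial value or a matching candidate's priority
theorem pvOuter_cases (s : List Char) :
    ∀ (l : List Nat) (b : Nat),
      l.foldl (fun b i => pvInnerB s i b) b = b ∨
      ∃ i ∈ l, ∃ q ∈ pvCands.getD (s.getD i ' ') [],
        PySem.Chars.startswith (List.drop i s) q.2.toList = true ∧
        l.foldl (fun b i => pvInnerB s i b) b = q.1 := by
  intro l
  induction l with
  | nil => intro b; left; rfl
  | cons i0 rest ih =>
    intro b
    simp only [List.foldl_cons]
    rcases ih (pvInnerB s i0 b) with h | ⟨i, hi, q, hq, hst, hval⟩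
    · rw [h]
      rcases pvInner_cases s i0 (pvCands.getD (s.getD i0 ' ') []) b with h0 | ⟨q, hq, hst, hval⟩
      · left; exact h0
      · right; exact ⟨i0, List.mem_cons_self, q, hq, hst, hval⟩
    · right; exact ⟨i, List.mem_cons_of_mem _ hi, q, hq, hst, hval⟩

-- membership in a candidate list is membership in pvFlat
theorem pvCands_mem_sound (c : Char) (q : Nat × String) (hq : q ∈ pvCands.getD c []) :
    q.1 < pvGroups.length ∧ q.2 ∈ (pvGroups.getD q.1 ([], "unknown")).1 := by
  rw [pvCands_getD] at hq
  obtain ⟨t, ht, hts⟩ := List.mem_map.1 hq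
  have := pvFlat_sound t (List.mem_of_mem_filter ht)
  rw [hts] at this
  exact this

-- a match at position i puts its candidate into the list looked up at i
theorem pvCands_mem_complete (s : List Char) (i j : Nat) (p : String)
    (hj : j < pvGroups.length) (hp : p ∈ (pvGroups.getD j ([], "unknown")).1)
    (hpne : p.toList ≠ [])
    (hst : PySem.Chars.startswith (List.drop i s) p.toList = true) :
    (j, p) ∈ pvCands.getD (s.getD i ' ') [] := by
  rw [pvCands_getD]
  have hmem := pvFlat_complete j hj p hp
  have hc := pvHeadAt s i p hpne hst
  refine List.mem_map.2 ⟨(p.toList.headD ' ', (j, p)), ?_, rfl⟩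
  refine List.mem_filter.2 ⟨hmem, ?_⟩
  simp at hc ⊢
  exact hc.symm

-- the ladder resolves the first occurring group
theorem pvLadder_eq (s : List Char) :
    ∀ gs : List (List String × String),
      pvLadder s gs =
        (match pvMu (pvMatchIn s) 0 gs with
         | none => "unknown"
         | some x => (gs.getD x ([], "unknown")).2) := by
  intro gs
  induction gs with
  | nil => rfl
  | cons g rest ih =>
    simp only [pvLadder, pvMu]
    by_cases hm : pvMatchIn s g = true
    · rw [if_pos hm, if_pos hm]; rfl
    · rw [if_neg hm, if_neg hm, ih, pvMu_shift]
      cases pvMu (pvMatchIn s) 0 rest <;> rfl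

-- A's port is the ladder over pvGroups
theorem pvA_eq_ladder (source : String) (h : ¬ source = "") :
    extract_model_from_source_py source = pvLadder (PySem.Chars.lower source.toList) pvGroups := by
  simp only [extract_model_from_source_py, if_neg h, pvGroups, pvLadder, pvMatchIn,
    List.any_cons, List.any_nil, Bool.or_false, PySem.Str.isIn_eq, PySem.Str.toList_lower]

-- ===== VERDICT (by name: the statement is the Claim_ definition above) =====
theorem extract_model_from_source_py_spec : Claim_equal_extract_model_from_source_py := by
  intro source _
  unfold Spec_extract_model_from_source_py
  by_cases h : source = ""
  · simp [extract_model_from_source_py, extract_model_from_source_py_alt, h]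
  · rw [pvA_eq_ladder source h, pvLadder_eq]
    simp only [extract_model_from_source_py_alt, if_neg h]
    set s := PySem.Chars.lower source.toList with hs
    set N := pvGroups.length with hN
    set best := (List.range s.length).foldl (fun b i => pvInnerB s i b) N with hbest
    cases hmu : pvMu (pvMatchIn s) 0 pvGroups with
    | none =>
      have hbN : best = N := by
        rw [hbest]
        rcases pvOuter_cases s (List.range s.length) N with hb | ⟨i, hi, q, hq, hst, _⟩
        · exact hb
        · exfalso
          obtain ⟨hqN, hqmem⟩ := pvCands_mem_sound _ q hq
          have hma : pvMatchAt s i pvGroups[q.1] = true := by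
            simp only [pvMatchAt, List.any_eq_true]
            exact ⟨q.2, by rwa [List.getD_eq_getElem _ _ hqN] at hqmem, hst⟩
          have hmi : pvMatchIn s pvGroups[q.1] = true :=
            (pvGroupBridge s _ (pvGroups_nonempty _ (List.getElem_mem hqN))).2
              ⟨i, List.mem_range.1 hi, hma⟩
          have := pvMu_none_iff.1 hmu _ (List.getElem_mem hqN)
          simp [hmi] at this
      rw [hbN, if_neg (lt_irrefl N)]
    | some x =>
      obtain ⟨hxN, hpx⟩ := pvMu_zero_mem hmu
      have hbx : best = x := by
        apply le_antisymm
        · obtain ⟨i, hin, hma⟩ := (pvGroupBridge s pvGroups[x]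
            (pvGroups_nonempty _ (List.getElem_mem hxN))).1 hpx
          simp only [pvMatchAt, List.any_eq_true] at hma
          obtain ⟨p, hp, hst⟩ := hma
          have hpne : p.toList ≠ [] := pvGroups_nonempty _ (List.getElem_mem hxN) p hp
          have hq : (x, p) ∈ pvCands.getD (s.getD i ' ') [] :=
            pvCands_mem_complete s i x p hxN (by rwa [List.getD_eq_getElem _ _ hxN]) hpne hst
          rw [hbest]
          exact pvOuter_le_of_mem s _ N i (List.mem_range.2 hin) (x, p) hq hst
        · rw [hbest]
          rcases pvOuter_cases s (List.range s.length) N with hb | ⟨i, hi, q, hq, hst, hval⟩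
          · rw [hb]; omega
          · rw [hval]
            obtain ⟨hqN, hqmem⟩ := pvCands_mem_sound _ q hq
            have hma : pvMatchAt s i pvGroups[q.1] = true := by
              simp only [pvMatchAt, List.any_eq_true]
              exact ⟨q.2, by rwa [List.getD_eq_getElem _ _ hqN] at hqmem, hst⟩
            have hmi : pvMatchIn s pvGroups[q.1] = true :=
              (pvGroupBridge s _ (pvGroups_nonempty _ (List.getElem_mem hqN))).2
                ⟨i, List.mem_range.1 hi, hma⟩
            exact pvMu_zero_min hmu q.1 hqN hmi
      rw [hbx, if_pos hxN]
      simp [PySem.List.pyGetD_natCast]
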